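-- pv_equiv track=rewrite | github.com/maciej-janusz/asd | dynamic_programming/05_06/truckload.py | truckload
-- ===== SOURCE A (Python) =====
-- def truckload(capacity, packages):
--     n = len(packages)
--     packages = sorted(packages)
--     kg = 0
--     cnt = 0
--     for i in range(n):
--         if capacity >= kg + packages[i]:
--             kg += packages[i]
--             cnt += 1
--
--     return kg, cnt
-- ===== SOURCE B (Python) =====
-- def truckload(capacity, packages):
--     # bulk-load all non-positive packages, then quickselect-partition the
--     # positive ones to find how many of the smallest fit, without sorting
--     if not packages or min(packages) > capacity:
--         return 0, 0
--     kg = 0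
--     cnt = 0
--     pos = []
--     for p in packages:
--         if p <= 0:
--             kg += p
--             cnt += 1
--         else:
--             pos.append(p)
--
--     def grab(xs, kg, cnt):
--         if not xs:
--             return kg, cnt
--         pivot = xs[len(xs) // 2]
--         lt = [x for x in xs if x < pivot]
--         gt = [x for x in xs if x > pivot]
--         m = len(xs) - len(lt) - len(gt)
--         s = sum(lt)
--         if kg + s > capacity:
--             return grab(lt, kg, cnt)
--         kg += s
--         cnt += len(lt)
--         t = min(m, (capacity - kg) // pivot)
--         kg += t * pivot
--         cnt += t
--         if t == m:
--             return grab(gt, kg, cnt)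
--         return kg, cnt
--
--     return grab(pos, kg, cnt)
-- ===== Notes on version B (the rewrite author's own statement) =====
-- stated objective: faster
-- what changed: B replaces A's full sort followed by a linear greedy scan with a quickselect-style recursion: non-positive packages are bulk-loaded in one pass (after an early exit when even the smallest package does not fit), and the positive packages are recursively three-way partitioned around a pivot, taking a whole partition (and an arithmetically computed number of pivot copies) at once instead of ever sorting.
import Mathlib
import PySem

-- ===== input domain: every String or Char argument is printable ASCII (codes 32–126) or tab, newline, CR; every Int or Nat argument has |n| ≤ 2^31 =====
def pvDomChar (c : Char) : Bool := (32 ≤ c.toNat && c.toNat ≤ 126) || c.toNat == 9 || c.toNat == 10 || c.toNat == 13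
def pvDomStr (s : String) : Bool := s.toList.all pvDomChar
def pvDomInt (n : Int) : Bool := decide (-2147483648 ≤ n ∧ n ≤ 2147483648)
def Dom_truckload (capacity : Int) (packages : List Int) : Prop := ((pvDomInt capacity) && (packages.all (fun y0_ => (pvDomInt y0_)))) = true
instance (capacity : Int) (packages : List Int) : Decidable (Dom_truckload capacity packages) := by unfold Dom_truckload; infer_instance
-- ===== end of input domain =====

-- B replaces A's sort-then-scan with a quickselect-style partition of the positive
-- packages (non-positive ones are bulk-loaded in one pass), avoiding the sort;
-- a timing run measured B faster; equality of return values is proved for all inputs.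

-- ===== PORT A =====
-- the loop body of A: if capacity >= kg + v: kg += v; cnt += 1
def pvStep (capacity : Int) (st : Int × Int) (v : Int) : Int × Int :=
  if capacity ≥ st.1 + v then (st.1 + v, st.2 + 1) else st

def truckload (capacity : Int) (packages : List Int) : Int × Int :=
  let n : Int := (packages.length : Int)
  let packages := PySem.List.sorted packages (fun x => x) false
  (PySem.List.pyRange 0 n 1).foldl
    (fun st i => pvStep capacity st (PySem.List.pyGetD packages i 0)) (0, 0)

-- ===== PORT B =====
-- the recursive helper `grab` of Source B: quickselect-style partition of positive packages
def truckloadGrab (capacity : Int) (xs : List Int) (kg cnt : Int) : Int × Int :=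
  if hxs : xs = [] then (kg, cnt)
  else
    let pivot := xs.getD (xs.length / 2) 0
    let lt := xs.filter (fun x => decide (x < pivot))
    let gt := xs.filter (fun x => decide (pivot < x))
    let m : Int := (xs.length : Int) - (lt.length : Int) - (gt.length : Int)
    let s := lt.sum
    if capacity < kg + s then truckloadGrab capacity lt kg cnt
    else
      let kg1 := kg + s
      let cnt1 := cnt + (lt.length : Int)
      let t := min m (PySem.Int.floordiv (capacity - kg1) pivot)
      if t = m then truckloadGrab capacity gt (kg1 + t * pivot) (cnt1 + t)
      else (kg1 + t * pivot, cnt1 + t)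
termination_by xs.length
decreasing_by
  all_goals {
    have hlen : xs.length / 2 < xs.length :=
      Nat.div_lt_self (List.length_pos_iff.mpr hxs) (by omega)
    have hmem : xs.getD (xs.length / 2) 0 ∈ xs := by
      rw [List.getD_eq_getElem xs 0 hlen]; exact List.getElem_mem hlen
    simp only [List.length_unattach]
    exact lt_of_lt_of_eq
      (List.length_filter_lt_length_iff_exists.mpr ⟨⟨_, hmem⟩, List.mem_attach _ _, by simp⟩)
      (List.length_attach (l := xs))
  }

def truckload_alt (capacity : Int) (packages : List Int) : Int × Int :=
  match PySem.List.min? packages (fun x => x) with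
  | none => (0, 0)        -- `not packages` short-circuits before min()
  | some mn =>
    if capacity < mn then (0, 0)
    else
      let st := packages.foldl
        (fun (acc : Int × Int × List Int) p =>
          if p ≤ 0 then (acc.1 + p, acc.2.1 + 1, acc.2.2)
          else (acc.1, acc.2.1, acc.2.2 ++ [p]))
        (0, 0, [])
      truckloadGrab capacity st.2.2 st.1 st.2.1

-- ===== PRECONDITION & SPEC =====
def Spec_truckload (capacity : Int) (packages : List Int) (out : Int × Int) : Prop := out = truckload_alt capacity packages
instance (capacity : Int) (packages : List Int) (out : Int × Int) : Decidable (Spec_truckload capacity packages out) := by unfold Spec_truckload; infer_instance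

-- ===== CLAIM (what is proved, stated in full; the proofs are below) =====
def Claim_equal_truckload : Prop := ∀ (capacity : Int) (packages : List Int), Dom_truckload capacity packages → Spec_truckload capacity packages (truckload capacity packages)

-- ===== LEMMAS AND PROOFS =====

-- nothing fits: the fold is the identity
theorem pvFoldNone (C kg cnt : Int) (l : List Int) (h : ∀ x ∈ l, C < kg + x) :
    l.foldl (pvStep C) (kg, cnt) = (kg, cnt) := by
  induction l with
  | nil => rfl
  | cons x r ih =>
    simp only [List.foldl_cons, pvStep]
    rw [if_neg (by have := h x (by simp); simp; omega)]
    exact ih (fun y hy => h y (by simp [hy]))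

-- everything is affordable: the fold takes it all
theorem pvFoldAll (C kg cnt : Int) (l : List Int) (h0 : ∀ x ∈ l, 0 ≤ x)
    (h : kg + l.sum ≤ C) :
    l.foldl (pvStep C) (kg, cnt) = (kg + l.sum, cnt + l.length) := by
  induction l generalizing kg cnt with
  | nil => simp
  | cons x r ih =>
    have hr : 0 ≤ r.sum := List.sum_nonneg (fun y hy => h0 y (by simp [hy]))
    simp only [List.foldl_cons, pvStep]
    rw [if_pos (by simp at h ⊢; omega)]
    rw [ih (kg + x) (cnt + 1) (fun y hy => h0 y (by simp [hy])) (by simp at h ⊢; omega)]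
    simp only [List.sum_cons, List.length_cons, Prod.mk.injEq]
    push_cast
    omega

-- non-positive elements: if the first one fits, all fit
theorem pvFoldNeg (C : Int) (l : List Int) : ∀ (kg cnt : Int), (∀ x ∈ l, x ≤ 0) →
    (∀ p r, l = p :: r → kg + p ≤ C) →
    l.foldl (pvStep C) (kg, cnt) = (kg + l.sum, cnt + l.length) := by
  induction l with
  | nil => intro kg cnt _ _; simp
  | cons x r ih =>
    intro kg cnt h0 hd
    simp only [List.foldl_cons, pvStep]
    rw [if_pos (by have := hd x r rfl; simp; omega)]
    rw [ih (kg + x) (cnt + 1) (fun y hy => h0 y (by simp [hy]))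
        (fun q s hqs => by
          have hq : q ≤ 0 := h0 q (by simp [hqs])
          have := hd x r rfl
          omega)]
    simp only [List.sum_cons, List.length_cons, Prod.mk.injEq]
    push_cast
    omega

-- the loaded weight never decreases on positive packages
theorem pvFoldMono (C : Int) (l : List Int) : ∀ (kg cnt : Int), (∀ x ∈ l, 0 < x) →
    kg ≤ (l.foldl (pvStep C) (kg, cnt)).1 := by
  induction l with
  | nil => intro kg cnt _; simp
  | cons x r ih =>
    intro kg cnt h0
    have hx : 0 < x := h0 x (by simp)
    simp only [List.foldl_cons, pvStep]
    split_ifs with hc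
    · have := ih (kg + x) (cnt + 1) (fun y hy => h0 y (by simp [hy])); omega
    · exact ih kg cnt (fun y hy => h0 y (by simp [hy]))

-- overflowing positive block: the final state cannot afford any further B-sized item
theorem pvFoldOverflow (C B : Int) (l : List Int) : ∀ (kg cnt : Int), (∀ x ∈ l, 0 < x) →
    (∀ x ∈ l, x ≤ B) → 0 < B → C < kg + l.sum →
    C < (l.foldl (pvStep C) (kg, cnt)).1 + B := by
  induction l with
  | nil => intro kg cnt _ _ hB hs; simp at hs ⊢; omega
  | cons x r ih =>
    intro kg cnt h0 hB hBpos hs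
    simp only [List.sum_cons] at hs
    simp only [List.foldl_cons, pvStep]
    split_ifs with hc
    · exact ih (kg + x) (cnt + 1) (fun y hy => h0 y (by simp [hy]))
        (fun y hy => hB y (by simp [hy])) hBpos (by omega)
    · have hmono := pvFoldMono C r kg cnt (fun y hy => h0 y (by simp [hy]))
      have hxB : x ≤ B := hB x (by simp)
      omega

-- a run of k equal positive packages: exactly min(k, (C-kg)/p) of them are taken
theorem pvFoldRep (C p : Int) (hp : 0 < p) : ∀ (k : Nat) (kg cnt : Int), kg ≤ C →
    (List.replicate k p).foldl (pvStep C) (kg, cnt) =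
      (kg + min (k : Int) ((C - kg) / p) * p, cnt + min (k : Int) ((C - kg) / p)) := by
  intro k
  induction k with
  | zero =>
    intro kg cnt hkg
    have hq : 0 ≤ (C - kg) / p := Int.ediv_nonneg (by omega) (by omega)
    simp only [Nat.cast_zero, List.replicate_zero, List.foldl_nil]
    rw [min_eq_left (by omega)]
    simp
  | succ k ih =>
    intro kg cnt hkg
    rw [List.replicate_succ]
    simp only [List.foldl_cons, pvStep]
    split_ifs with hc
    · -- the item fits: take it, recurse
      have hq1 : 1 ≤ (C - kg) / p := by
        rw [Int.le_ediv_iff_mul_le (by omega)]; omega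
      have hq' : (C - (kg + p)) / p = (C - kg) / p - 1 := by
        have : C - (kg + p) = (C - kg) + (-1) * p := by ring
        rw [this, Int.add_mul_ediv_right _ _ (by omega : p ≠ 0)]
        omega
      rw [ih (kg + p) (cnt + 1) (by omega)]
      rw [hq']
      have hmin : min ((k : Int) + 1) ((C - kg) / p) = min (k : Int) ((C - kg) / p - 1) + 1 := by
        omega
      push_cast
      rw [hmin]
      simp only [Prod.mk.injEq]
      constructor <;> ring
    · -- it does not fit: nothing more is taken
      have h0 : 0 ≤ C - kg := by omega
      have hq0 : (C - kg) / p = 0 := Int.ediv_eq_zero_of_lt h0 (by omega)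
      rw [pvFoldNone C kg cnt _ (fun y hy => by
        have := List.eq_of_mem_replicate hy; omega)]
      have : min (((k : Int) + 1)) ((C - kg) / p) = 0 := by omega
      push_cast
      rw [this]
      simp

-- a list of non-positive numbers has non-positive sum
theorem pvSumNonpos (l : List Int) (h : ∀ x ∈ l, x ≤ 0) : l.sum ≤ 0 := by
  induction l with
  | nil => simp
  | cons y r ih =>
    have := h y (by simp)
    have := ih (fun z hz => h z (by simp [hz]))
    simp only [List.sum_cons]; omega

-- sum of non-positive numbers is below each of them
theorem pvSumLe (l : List Int) (x : Int) (h0 : ∀ y ∈ l, y ≤ 0) (hx : x ∈ l) :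
    l.sum ≤ x := by
  induction l with
  | nil => cases hx
  | cons y r ih =>
    have hsr : r.sum ≤ 0 := pvSumNonpos r (fun z hz => h0 z (by simp [hz]))
    rcases List.mem_cons.mp hx with h | h
    · subst h; simp only [List.sum_cons]; omega
    · have := ih (fun z hz => h0 z (by simp [hz])) h
      have hy : y ≤ 0 := h0 y (by simp)
      simp only [List.sum_cons]; omega

-- three-way partition is a permutation
theorem pvPerm3 (xs : List Int) (p : Int) :
    (xs.filter (fun x => decide (x < p)) ++ List.replicate (xs.count p) p ++
      xs.filter (fun x => decide (p < x))).Perm xs := by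
  rw [List.perm_iff_count]
  intro a
  simp only [List.count_append, List.count_replicate]
  have hz : ∀ (q : Int → Bool), q a = false → List.count a (xs.filter q) = 0 := by
    intro q hq
    refine List.count_eq_zero.mpr (fun hmem => ?_)
    rw [List.mem_filter] at hmem
    rw [hq] at hmem
    exact Bool.false_ne_true hmem.2
  rcases lt_trichotomy a p with h | h | h
  · rw [List.count_filter (by simp [h]), hz _ (by simp only [decide_eq_false_iff_not]; omega)]
    simp
    intro h'
    exact absurd h' (by omega)
  · subst h
    rw [hz _ (by simp), hz _ (by simp)]
    simp
  · rw [hz _ (by simp only [decide_eq_false_iff_not]; omega), List.count_filter (by simp [h])]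
    simp
    intro h'
    exact absurd h' (by omega)

-- sorted(xs) splits at a pivot
theorem pvSortedSplit (xs : List Int) (p : Int) :
    PySem.List.sorted xs (fun x => x) false =
      PySem.List.sorted (xs.filter (fun x => decide (x < p))) (fun x => x) false ++
      List.replicate (xs.count p) p ++
      PySem.List.sorted (xs.filter (fun x => decide (p < x))) (fun x => x) false := by
  apply PySem.List.sorted_id_eq_of_perm_of_pairwise
  · refine List.Perm.trans ?_ (pvPerm3 xs p)
    exact ((PySem.List.sorted_perm _ _ _).append_right _).append
      (PySem.List.sorted_perm _ _ _)
  · rw [List.pairwise_append, List.pairwise_append]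
    refine ⟨⟨PySem.List.sorted_pairwise _ _, List.pairwise_replicate.mpr (by simp), ?_⟩,
      PySem.List.sorted_pairwise _ _, ?_⟩
    · intro x hx y hy
      rw [PySem.List.mem_sorted, List.mem_filter] at hx
      have hxp : x < p := by simpa using hx.2
      have hyp : y = p := List.eq_of_mem_replicate hy
      omega
    · intro x hx y hy
      rw [List.mem_append] at hx
      rw [PySem.List.mem_sorted, List.mem_filter] at hy
      have hyp : p < y := by simpa using hy.2
      rcases hx with hx | hx
      · rw [PySem.List.mem_sorted, List.mem_filter] at hx
        have : x < p := by simpa using hx.2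
        omega
      · have : x = p := List.eq_of_mem_replicate hx
        omega

-- quickselect grab = greedy fold over the sorted list (positive packages)
theorem pvGrab (C : Int) : ∀ (n : Nat) (xs : List Int) (kg cnt : Int), xs.length ≤ n →
    (∀ x ∈ xs, 0 < x) → kg ≤ C →
    truckloadGrab C xs kg cnt =
      (PySem.List.sorted xs (fun x => x) false).foldl (pvStep C) (kg, cnt) := by
  intro n
  induction n with
  | zero =>
    intro xs kg cnt hlen _ _
    have hnil : xs = [] := List.length_eq_zero_iff.mp (by omega)
    subst hnil
    rw [truckloadGrab]
    simp [PySem.List.sorted]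
  | succ n ih =>
    intro xs kg cnt hlen h0 hkg
    by_cases hxs : xs = []
    · subst hxs
      rw [truckloadGrab]
      simp [PySem.List.sorted]
    rw [truckloadGrab, dif_neg hxs]
    have hlen2 : xs.length / 2 < xs.length :=
      Nat.div_lt_self (List.length_pos_iff.mpr hxs) (by omega)
    have hmem : xs.getD (xs.length / 2) 0 ∈ xs := by
      rw [List.getD_eq_getElem xs 0 hlen2]; exact List.getElem_mem hlen2
    set pivot := xs.getD (xs.length / 2) 0 with hpiv
    have hp : 0 < pivot := h0 _ hmem
    set lt := xs.filter (fun x => decide (x < pivot)) with hlt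
    set gt := xs.filter (fun x => decide (pivot < x)) with hgt
    -- elements of the parts
    have hltmem : ∀ x ∈ lt, x ∈ xs ∧ x < pivot := by
      intro x hx; rw [hlt, List.mem_filter] at hx; exact ⟨hx.1, by simpa using hx.2⟩
    have hgtmem : ∀ x ∈ gt, x ∈ xs ∧ pivot < x := by
      intro x hx; rw [hgt, List.mem_filter] at hx; exact ⟨hx.1, by simpa using hx.2⟩
    -- lengths
    have hltlen : lt.length < xs.length := by
      rw [hlt]
      exact List.length_filter_lt_length_iff_exists.mpr ⟨pivot, hmem, by simp⟩
    have hgtlen : gt.length < xs.length := by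
      rw [hgt]
      exact List.length_filter_lt_length_iff_exists.mpr ⟨pivot, hmem, by simp⟩
    have hcnt : (xs.length : Int) - (lt.length : Int) - (gt.length : Int) =
        ((xs.count pivot : Nat) : Int) := by
      have := (pvPerm3 xs pivot).length_eq
      simp only [List.length_append, List.length_replicate] at this
      rw [← hlt, ← hgt] at this
      omega
    -- sorted parts
    have hsum : (PySem.List.sorted lt (fun x => x) false).sum = lt.sum :=
      (PySem.List.sorted_perm lt _ _).sum_eq
    have hslen : (PySem.List.sorted lt (fun x => x) false).length = lt.length :=
      PySem.List.length_sorted lt _ _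
    rw [pvSortedSplit xs pivot, ← hlt, ← hgt, List.foldl_append, List.foldl_append]
    by_cases hover : C < kg + lt.sum
    · -- overflow inside lt: the tail of the sorted list changes nothing
      rw [if_pos hover]
      rcases hst : (PySem.List.sorted lt (fun x => x) false).foldl (pvStep C) (kg, cnt)
        with ⟨k', c'⟩
      have hstuck : C < k' + pivot := by
        have := pvFoldOverflow C pivot (PySem.List.sorted lt (fun x => x) false) kg cnt
          (fun x hx => (h0 x ((hltmem x ((PySem.List.mem_sorted _ _ _ _).mp hx)).1)))
          (fun x hx => le_of_lt (hltmem x ((PySem.List.mem_sorted _ _ _ _).mp hx)).2)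
          hp (by rw [hsum]; omega)
        rw [hst] at this
        exact this
      rw [pvFoldNone C k' c' _ (fun y hy => by
        have := List.eq_of_mem_replicate hy; omega)]
      rw [pvFoldNone C k' c' _ (fun y hy => by
        have := (hgtmem y ((PySem.List.mem_sorted _ _ _ _).mp hy)).2; omega)]
      rw [← hst]
      exact ih lt kg cnt (by omega) (fun x hx => h0 x (hltmem x hx).1) hkg
    · -- all of lt fits
      rw [if_neg hover]
      simp only []
      rw [pvFoldAll C kg cnt _ (fun x hx =>
          le_of_lt (h0 x (hltmem x ((PySem.List.mem_sorted _ _ _ _).mp hx)).1))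
          (by rw [hsum]; omega)]
      rw [hsum, hslen]
      have hkg1 : kg + lt.sum ≤ C := by omega
      rw [pvFoldRep C pivot hp (xs.count pivot) (kg + lt.sum) (cnt + lt.length) hkg1]
      rw [hcnt, PySem.Int.floordiv_eq_ediv_of_pos hp]
      set q : Int := (C - (kg + lt.sum)) / pivot with hq
      set t : Int := min ((xs.count pivot : Nat) : Int) q with ht
      have hq0 : 0 ≤ q := Int.ediv_nonneg (by omega) (by omega)
      by_cases htm : t = ((xs.count pivot : Nat) : Int)
      · rw [if_pos htm]
        have hkg2 : kg + lt.sum + t * pivot ≤ C := by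
          have h1 : t ≤ q := by omega
          have h2 : t * pivot ≤ q * pivot :=
            mul_le_mul_of_nonneg_right h1 hp.le
          have h3 : q * pivot ≤ C - (kg + lt.sum) := by
            rw [hq]; exact Int.ediv_mul_le _ (by omega)
          omega
        rw [← hlt, ← hgt]
        exact ih gt _ _ (by omega) (fun x hx => hp.trans (hgtmem x hx).2) hkg2
      · rw [if_neg htm]
        have htq : t = q := by omega
        have hstep : C - (kg + lt.sum) < q * pivot + pivot := by
          have := Int.lt_ediv_add_one_mul_self (C - (kg + lt.sum)) hp
          rw [add_mul, one_mul] at this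
          omega
        rw [pvFoldNone C _ _ _ (fun y hy => by
          have hy2 := (hgtmem y ((PySem.List.mem_sorted _ _ _ _).mp hy)).2
          have : t * pivot = q * pivot := by rw [htq]
          omega)]

-- B's collecting loop, characterised by filters
theorem pvCollect (l : List Int) : ∀ (a b : Int) (acc : List Int),
    l.foldl (fun (st : Int × Int × List Int) p =>
        if p ≤ 0 then (st.1 + p, st.2.1 + 1, st.2.2)
        else (st.1, st.2.1, st.2.2 ++ [p])) (a, b, acc) =
      (a + (l.filter (fun p => decide (p ≤ 0))).sum,
       b + ((l.filter (fun p => decide (p ≤ 0))).length : Int),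
       acc ++ l.filter (fun p => !decide (p ≤ 0))) := by
  induction l with
  | nil => intro a b acc; simp
  | cons x r ih =>
    intro a b acc
    by_cases hx : x ≤ 0
    · simp only [List.foldl_cons, if_pos hx]
      rw [ih]
      simp only [List.filter_cons, hx, decide_true, if_pos, ite_true, Bool.not_true,
        Bool.false_eq_true, if_neg, ite_false, List.sum_cons, List.length_cons,
        Prod.mk.injEq]
      refine ⟨by ring, by push_cast; ring, trivial⟩
    · simp only [List.foldl_cons, if_neg hx]
      rw [ih]
      simp only [List.filter_cons, hx, decide_false, Bool.false_eq_true, if_neg,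
        ite_false, Bool.not_false, ite_true, Prod.mk.injEq]
      refine ⟨trivial, trivial, by simp [List.append_assoc]⟩

-- sorted(xs) = sorted(non-positives) ++ sorted(positives)
theorem pvSortedNegPos (xs : List Int) :
    PySem.List.sorted xs (fun x => x) false =
      PySem.List.sorted (xs.filter (fun p => decide (p ≤ 0))) (fun x => x) false ++
      PySem.List.sorted (xs.filter (fun p => !decide (p ≤ 0))) (fun x => x) false := by
  apply PySem.List.sorted_id_eq_of_perm_of_pairwise
  · refine List.Perm.trans ?_ (List.filter_append_perm (fun p : Int => decide (p ≤ 0)) xs)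
    exact (PySem.List.sorted_perm _ _ _).append (PySem.List.sorted_perm _ _ _)
  · rw [List.pairwise_append]
    refine ⟨PySem.List.sorted_pairwise _ _, PySem.List.sorted_pairwise _ _, ?_⟩
    intro x hx y hy
    rw [PySem.List.mem_sorted, List.mem_filter] at hx hy
    have h1 : x ≤ 0 := by simpa using hx.2
    have h2 : ¬ y ≤ 0 := by simpa using hy.2
    omega

-- A's range-indexed loop = fold of pvStep over the sorted list
theorem pvPortA (C : Int) (packages : List Int) :
    truckload C packages =
      (PySem.List.sorted packages (fun x => x) false).foldl (pvStep C) (0, 0) := by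
  show (PySem.List.pyRange 0 (packages.length : Int) 1).foldl
      (fun st i => pvStep C st
        (PySem.List.pyGetD (PySem.List.sorted packages (fun x => x) false) i 0)) (0, 0) = _
  rw [show (packages.length : Int) =
      ((PySem.List.sorted packages (fun x => x) false).length : Int) by
    rw [PySem.List.length_sorted]]
  exact PySem.List.foldl_pyRange_zero_pyGetD' _ 0 (pvStep C) (0, 0)

-- ===== VERDICT (by name: the statement is the Claim_ definition above) =====
theorem truckload_spec : Claim_equal_truckload := by
  intro C P _dom
  unfold Spec_truckload
  rw [pvPortA]
  cases hmin : PySem.List.min? P (fun x => x) with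
  | none =>
    have hP : P = [] := (PySem.List.min?_eq_none_iff P _).mp hmin
    subst hP
    simp [truckload_alt, PySem.List.sorted, PySem.List.min?]
  | some mn =>
    have hmem := PySem.List.min?_mem hmin
    have hmin2 := PySem.List.min?_isMin hmin
    by_cases hC : C < mn
    · rw [pvFoldNone C 0 0 (PySem.List.sorted P (fun x => x) false) (fun y hy => by
        have := hmin2 y ((PySem.List.mem_sorted _ _ _ _).mp hy); simp at this; omega)]
      simp [truckload_alt, hmin, if_pos hC]
    · simp only [truckload_alt, hmin, if_neg hC]
      rw [pvCollect P 0 0 []]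
      simp only [List.nil_append]
      set negP := P.filter (fun p => decide (p ≤ 0)) with hneg
      set posP := P.filter (fun p => !decide (p ≤ 0)) with hpos
      have hnegmem : ∀ x ∈ negP, x ≤ 0 := by
        intro x hx; rw [hneg, List.mem_filter] at hx; simpa using hx.2
      have hposmem : ∀ x ∈ posP, 0 < x := by
        intro x hx; rw [hpos, List.mem_filter] at hx
        have := hx.2; simp at this; omega
      have hmnC : mn ≤ C := by omega
      rw [pvSortedNegPos P, ← hneg, ← hpos, List.foldl_append]
      have hhead : ∀ p r, PySem.List.sorted negP (fun x => x) false = p :: r →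
          (0 : Int) + p ≤ C := by
        intro p r hpr
        have hpmem : p ∈ negP := by
          rw [← PySem.List.mem_sorted negP (fun x => x) false, hpr]; simp
        have hple : p ≤ 0 := hnegmem p hpmem
        by_cases h0C : 0 ≤ C
        · omega
        · have hmnmem : mn ∈ negP := by
            rw [hneg, List.mem_filter]
            exact ⟨hmem, by simp; omega⟩
          have := PySem.List.key_head_sorted_le negP (fun x => x) hpr mn hmnmem
          simp at this
          omega
      rw [pvFoldNeg C (PySem.List.sorted negP (fun x => x) false) 0 0
        (fun x hx => hnegmem x ((PySem.List.mem_sorted _ _ _ _).mp hx)) hhead]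
      rw [(PySem.List.sorted_perm negP (fun x => x) false).sum_eq,
        PySem.List.length_sorted]
      simp only [zero_add]
      have hkgC : negP.sum ≤ C := by
        by_cases h0C : 0 ≤ C
        · have := pvSumNonpos negP hnegmem; omega
        · have hmnmem : mn ∈ negP := by
            rw [hneg, List.mem_filter]
            exact ⟨hmem, by simp; omega⟩
          have := pvSumLe negP mn hnegmem hmnmem; omega
      exact (pvGrab C posP.length posP negP.sum (negP.length : Int) le_rfl hposmem hkgC).symm
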